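-- pv_equiv track=rewrite | github.com/ffyycc/Artificial_Intelligence_Projects | cs440_mp4/viterbi_1.py | make_V_n_transition_table
-- ===== SOURCE A (Python) =====
-- def make_V_n_transition_table(dic,tag_list):
--     table = {}
--     total_V = 0
--     total_n = 0
--     for tag in tag_list:
--         V = 0
--         n = 0
--         for tag_pair in dic:
--             if (tag_pair[0] == tag):
--                 total_V += 1
--                 total_n += dic[tag_pair]
--                 V += 1
--                 n += dic[tag_pair]
--         table[tag] = (V,n)
--     return table,total_V -1,total_n  # exclude end
-- ===== SOURCE B (Python) =====
-- def make_V_n_transition_table(dic, tag_list):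
--     # one pass over dic: bucket (count, weight-sum) by the pair's first tag
--     buckets = {}
--     for tag_pair in dic:
--         V, n = buckets.get(tag_pair[0], (0, 0))
--         buckets[tag_pair[0]] = (V + 1, n + dic[tag_pair])
--     table = {}
--     total_V = 0
--     total_n = 0
--     for tag in tag_list:
--         V, n = buckets.get(tag, (0, 0))
--         table[tag] = (V, n)
--         total_V += V
--         total_n += n
--     return table, total_V - 1, total_n
-- ===== Notes on version B (the rewrite author's own statement) =====
-- stated objective: faster
-- what changed: Instead of rescanning the whole dict once per tag, B buckets (count, weight-sum) by each pair's first element in a single pass over dic, then answers every tag by one dictionary lookup.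
import Mathlib
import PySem

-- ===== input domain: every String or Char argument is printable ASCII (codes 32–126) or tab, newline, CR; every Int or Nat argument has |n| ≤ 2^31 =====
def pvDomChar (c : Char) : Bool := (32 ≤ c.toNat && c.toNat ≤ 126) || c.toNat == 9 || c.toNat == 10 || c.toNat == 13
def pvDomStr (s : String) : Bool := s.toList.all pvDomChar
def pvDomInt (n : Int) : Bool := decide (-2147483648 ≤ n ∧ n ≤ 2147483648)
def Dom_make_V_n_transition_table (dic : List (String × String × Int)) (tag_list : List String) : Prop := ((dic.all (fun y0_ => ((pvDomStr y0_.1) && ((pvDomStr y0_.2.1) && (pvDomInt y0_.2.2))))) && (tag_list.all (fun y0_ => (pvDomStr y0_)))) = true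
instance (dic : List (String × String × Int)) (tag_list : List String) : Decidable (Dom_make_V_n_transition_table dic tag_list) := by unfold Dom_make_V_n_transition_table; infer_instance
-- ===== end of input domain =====

-- B replaces A's per-tag rescans of the whole dict by one bucketing pass over dic plus one lookup per tag (objective: faster).

-- ===== PORT A =====
-- A: for each tag, scan all of dic counting pairs whose first element is the tag and summing their
-- values (each hit also bumps the running totals), storing (V, n) per tag in a dict.
def make_V_n_transition_table (dic : List (String × String × Int)) (tag_list : List String) : (List (String × Int × Int)) × Int × Int :=
  let st := tag_list.foldl
    (fun (st : PySem.Dict String (Int × Int) × Int × Int) tag =>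
      let r := dic.foldl
        (fun (acc : Int × Int × Int × Int) tag_pair =>
          if tag_pair.1 == tag then
            (acc.1 + 1, acc.2.1 + tag_pair.2.2, acc.2.2.1 + 1, acc.2.2.2 + tag_pair.2.2)
          else acc)
        (st.2.1, st.2.2, 0, 0)
      (st.1.insert tag (r.2.2.1, r.2.2.2), r.1, r.2.1))
    (PySem.Dict.empty, 0, 0)
  (st.1.items, st.2.1 - 1, st.2.2)

-- ===== PORT B =====
def make_V_n_transition_table_alt (dic : List (String × String × Int)) (tag_list : List String) : (List (String × Int × Int)) × Int × Int :=
  let buckets := dic.foldl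
    (fun (b : PySem.Dict String (Int × Int)) tag_pair =>
      let vn := b.getD tag_pair.1 (0, 0)
      b.insert tag_pair.1 (vn.1 + 1, vn.2 + tag_pair.2.2))
    PySem.Dict.empty
  let st := tag_list.foldl
    (fun (st : PySem.Dict String (Int × Int) × Int × Int) tag =>
      let vn := buckets.getD tag (0, 0)
      (st.1.insert tag vn, st.2.1 + vn.1, st.2.2 + vn.2))
    (PySem.Dict.empty, 0, 0)
  (st.1.items, st.2.1 - 1, st.2.2)

-- ===== PRECONDITION & SPEC =====
-- dic is a Python dict, so its keys (the tag pairs) are distinct; this excludes no input the Python A is run on.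
def Pre_make_V_n_transition_table (dic : List (String × String × Int)) (tag_list : List String) : Prop :=
  (dic.map (fun p => (p.1, p.2.1))).Nodup
instance (dic : List (String × String × Int)) (tag_list : List String) : Decidable (Pre_make_V_n_transition_table dic tag_list) := by unfold Pre_make_V_n_transition_table; infer_instance
def pvWitness_make_V_n_transition_table : (List (String × String × Int)) × List String :=
  ([("a", "x", 2), ("b", "y", 3), ("a", "z", 5)], ["a", "c"])

def Spec_make_V_n_transition_table (dic : List (String × String × Int)) (tag_list : List String) (out : (List (String × Int × Int)) × Int × Int) : Prop := out = make_V_n_transition_table_alt dic tag_list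
instance (dic : List (String × String × Int)) (tag_list : List String) (out : (List (String × Int × Int)) × Int × Int) : Decidable (Spec_make_V_n_transition_table dic tag_list out) := by unfold Spec_make_V_n_transition_table; infer_instance

-- ===== CLAIM (what is proved, stated in full; the proofs are below) =====
def Claim_equal_make_V_n_transition_table : Prop := ∀ (dic : List (String × String × Int)) (tag_list : List String), Dom_make_V_n_transition_table dic tag_list → Pre_make_V_n_transition_table dic tag_list → Spec_make_V_n_transition_table dic tag_list (make_V_n_transition_table dic tag_list)

-- ===== LEMMAS AND PROOFS =====

-- count of pairs with first element `tag` and the sum of their weights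
def pvCnt (dic : List (String × String × Int)) (tag : String) : Int :=
  ((dic.filter (fun p => p.1 == tag)).length : Int)
def pvSum (dic : List (String × String × Int)) (tag : String) : Int :=
  ((dic.filter (fun p => p.1 == tag)).map (fun p => p.2.2)).sum

-- A's inner scan computes (tV + cnt, tn + sum, cnt, sum)
theorem pvInnerA (dic : List (String × String × Int)) (tag : String) :
    ∀ (a b u v : Int),
      dic.foldl
        (fun (acc : Int × Int × Int × Int) tag_pair =>
          if tag_pair.1 == tag then
            (acc.1 + 1, acc.2.1 + tag_pair.2.2, acc.2.2.1 + 1, acc.2.2.2 + tag_pair.2.2)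
          else acc)
        (a, b, u, v)
      = (a + pvCnt dic tag, b + pvSum dic tag, u + pvCnt dic tag, v + pvSum dic tag) := by
  induction dic with
  | nil => intro a b u v; simp [pvCnt, pvSum]
  | cons p rest ih =>
    intro a b u v
    by_cases h : p.1 = tag
    · simp only [List.foldl_cons, h, BEq.rfl, if_true, ih,
        pvCnt, pvSum, List.filter_cons, BEq.rfl, Prod.mk.injEq]
      simp only [List.length_cons, List.map_cons, List.sum_cons]
      and_intros <;> (push_cast; ring)
    · have h' : (p.1 == tag) = false := by simp [h]
      simp only [List.foldl_cons, h', Bool.false_eq_true, if_false, ih,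
        pvCnt, pvSum, List.filter_cons]

-- B's bucketing pass: looking up `tag` in the buckets built from `dic` on top of `b`
theorem pvBuckets (dic : List (String × String × Int)) :
    ∀ (b : PySem.Dict String (Int × Int)) (tag : String),
      (dic.foldl
        (fun (b : PySem.Dict String (Int × Int)) tag_pair =>
          let vn := b.getD tag_pair.1 (0, 0)
          b.insert tag_pair.1 (vn.1 + 1, vn.2 + tag_pair.2.2)) b).getD tag (0, 0)
      = ((b.getD tag (0, 0)).1 + pvCnt dic tag, (b.getD tag (0, 0)).2 + pvSum dic tag) := by
  induction dic with
  | nil => intro b tag; simp [pvCnt, pvSum]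
  | cons p rest ih =>
    intro b tag
    simp only [List.foldl_cons, ih]
    rw [PySem.Dict.getD_insert]
    by_cases h : tag = p.1
    · subst h
      simp only [if_true, pvCnt, pvSum, List.filter_cons, BEq.rfl, Prod.mk.injEq]
      simp only [List.length_cons, List.map_cons, List.sum_cons]
      and_intros <;> (push_cast; ring)
    · have h' : (p.1 == tag) = false := by simp [Ne.symm h]
      simp only [h, if_false, pvCnt, pvSum, List.filter_cons, h', Bool.false_eq_true]

theorem make_V_n_transition_table_eq (dic : List (String × String × Int)) (tag_list : List String) :
    make_V_n_transition_table dic tag_list = make_V_n_transition_table_alt dic tag_list := by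
  unfold make_V_n_transition_table make_V_n_transition_table_alt
  have hstep :
      (fun (st : PySem.Dict String (Int × Int) × Int × Int) tag =>
        let r := dic.foldl
          (fun (acc : Int × Int × Int × Int) tag_pair =>
            if tag_pair.1 == tag then
              (acc.1 + 1, acc.2.1 + tag_pair.2.2, acc.2.2.1 + 1, acc.2.2.2 + tag_pair.2.2)
            else acc)
          (st.2.1, st.2.2, 0, 0)
        (st.1.insert tag (r.2.2.1, r.2.2.2), r.1, r.2.1))
      = (fun (st : PySem.Dict String (Int × Int) × Int × Int) tag =>
        let vn := (dic.foldl
          (fun (b : PySem.Dict String (Int × Int)) tag_pair =>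
            let vn := b.getD tag_pair.1 (0, 0)
            b.insert tag_pair.1 (vn.1 + 1, vn.2 + tag_pair.2.2)) PySem.Dict.empty).getD tag (0, 0)
        (st.1.insert tag vn, st.2.1 + vn.1, st.2.2 + vn.2)) := by
    funext st tag
    simp only [pvInnerA dic tag, pvBuckets dic PySem.Dict.empty tag, PySem.Dict.getD_empty]
    simp
  rw [hstep]

-- ===== VERDICT (by name: the statement is the Claim_ definition above) =====
theorem make_V_n_transition_table_spec : Claim_equal_make_V_n_transition_table := by
  intro dic tag_list _ _
  exact make_V_n_transition_table_eq dic tag_list
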